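-- pv_equiv track=rewrite | github.com/GabeNaturesSeed/nature-seed-data | marketing/spring-2026-recovery/scripts/push_replacement_properties.py | assign_primary_category
-- ===== SOURCE A (Python) =====
-- CATEGORY_PRIORITY = ["Lawn", "Pasture", "Wildflower", "Clover", "Cover Crop", "Food Plot", "Specialty"]
--
-- def assign_primary_category(email: str, category_map: dict) -> str:
--     """Assign a primary seed category for a customer based on purchase history."""
--     info = category_map.get(email, category_map.get(email.lower()))
--     if not info:
--         return "Unknown"
--     groups = info.get("groups", [])
--     for priority_cat in CATEGORY_PRIORITY:
--         if priority_cat in groups: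
--             return priority_cat
--     return groups[0] if groups else "Unknown"
-- ===== SOURCE B (Python) =====
-- CATEGORY_PRIORITY = ["Lawn", "Pasture", "Wildflower", "Clover", "Cover Crop", "Food Plot", "Specialty"]
-- PRIORITY_INDEX = {cat: i for i, cat in enumerate(CATEGORY_PRIORITY)}
--
-- def assign_primary_category(email: str, category_map: dict) -> str:
--     """Assign a primary seed category for a customer based on purchase history."""
--     info = category_map.get(email, category_map.get(email.lower()))
--     if not info:
--         return "Unknown"
--     groups = info.get("groups", [])
--     best = None
--     for g in groups:
--         i = PRIORITY_INDEX.get(g)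
--         if i is not None and (best is None or i < best):
--             best = i
--     if best is not None:
--         return CATEGORY_PRIORITY[best]
--     return groups[0] if groups else "Unknown"
-- ===== Notes on version B (the rewrite author's own statement) =====
-- stated objective: alternative
-- what changed: Instead of scanning CATEGORY_PRIORITY and testing membership in groups for each priority, B makes a single pass over groups keeping the minimal priority index via a precomputed PRIORITY_INDEX dict, then indexes back into CATEGORY_PRIORITY; fallbacks unchanged.
import Mathlib
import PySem

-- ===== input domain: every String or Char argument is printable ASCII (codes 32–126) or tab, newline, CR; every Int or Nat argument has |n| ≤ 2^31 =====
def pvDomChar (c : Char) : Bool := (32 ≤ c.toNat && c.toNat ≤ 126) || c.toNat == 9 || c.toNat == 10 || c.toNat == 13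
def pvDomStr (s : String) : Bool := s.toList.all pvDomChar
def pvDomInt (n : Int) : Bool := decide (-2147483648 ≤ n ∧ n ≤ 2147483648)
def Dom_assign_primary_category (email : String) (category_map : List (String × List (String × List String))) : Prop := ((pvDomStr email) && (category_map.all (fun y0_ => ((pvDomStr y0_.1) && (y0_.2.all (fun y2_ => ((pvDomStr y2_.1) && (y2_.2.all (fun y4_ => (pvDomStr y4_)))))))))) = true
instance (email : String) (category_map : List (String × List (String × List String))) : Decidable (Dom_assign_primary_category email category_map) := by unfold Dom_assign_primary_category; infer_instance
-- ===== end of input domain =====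

-- B replaces A's scan over CATEGORY_PRIORITY (membership test per priority) by one pass over
-- groups keeping the minimal priority index via a precomputed index dict; same fallbacks.


-- ===== PORT A =====
def CATEGORY_PRIORITY : List String :=
  ["Lawn", "Pasture", "Wildflower", "Clover", "Cover Crop", "Food Plot", "Specialty"]

-- the 'for priority_cat in CATEGORY_PRIORITY: if priority_cat in groups: return priority_cat' loop
def apcLoop (groups : List String) : List String → Option String
  | [] => none
  | p :: ps => if p ∈ groups then some p else apcLoop groups ps

def assign_primary_category (email : String) (category_map : List (String × List (String × List String))) : String :=
  let info := ((PySem.Dict.mk category_map).get? email).orElse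
      (fun _ => (PySem.Dict.mk category_map).get? (PySem.Str.lower email))
  match info with
  | none => "Unknown"            -- 'not info': missing key
  | some inner =>
    if inner = [] then "Unknown" -- 'not info': empty dict is falsy
    else
      let groups := (PySem.Dict.mk inner).getD "groups" []
      match apcLoop groups CATEGORY_PRIORITY with
      | some p => p
      | none => match groups with
                | [] => "Unknown"
                | g :: _ => g

-- ===== PORT B =====
-- {cat: i for i, cat in enumerate(CATEGORY_PRIORITY)}, a module constant
def PRIORITY_INDEX : PySem.Dict String Int :=
  PySem.Dict.mk [("Lawn", 0), ("Pasture", 1), ("Wildflower", 2), ("Clover", 3),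
                 ("Cover Crop", 4), ("Food Plot", 5), ("Specialty", 6)]

-- body of 'for g in groups: i = PRIORITY_INDEX.get(g); if i is not None and (best is None or i < best): best = i'
def bStep (best : Option Int) (g : String) : Option Int :=
  match PRIORITY_INDEX.get? g with
  | none => best
  | some i => match best with
              | none => some i
              | some b => if i < b then some i else best

def assign_primary_category_alt (email : String) (category_map : List (String × List (String × List String))) : String :=
  let info := ((PySem.Dict.mk category_map).get? email).orElse
      (fun _ => (PySem.Dict.mk category_map).get? (PySem.Str.lower email))
  match info with
  | none => "Unknown"
  | some inner =>
    if inner = [] then "Unknown"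
    else
      let groups := (PySem.Dict.mk inner).getD "groups" []
      match groups.foldl bStep none with
      | some i => (PySem.List.pyGet? CATEGORY_PRIORITY i).getD "Unknown"  -- index always in range here
      | none => match groups with
                | [] => "Unknown"
                | g :: _ => g

-- ===== PRECONDITION & SPEC =====
def Spec_assign_primary_category (email : String) (category_map : List (String × List (String × List String))) (out : String) : Prop := out = assign_primary_category_alt email category_map
instance (email : String) (category_map : List (String × List (String × List String))) (out : String) : Decidable (Spec_assign_primary_category email category_map out) := by unfold Spec_assign_primary_category; infer_instance

-- ===== CLAIM (what is proved, stated in full; the proofs are below) =====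
def Claim_equal_assign_primary_category : Prop := ∀ (email : String) (category_map : List (String × List (String × List String))), Dom_assign_primary_category email category_map → Spec_assign_primary_category email category_map (assign_primary_category email category_map)

-- ===== LEMMAS AND PROOFS =====

-- characterise the index lookup on the concrete 7-entry dict
lemma idx_eq (g : String) (j : Int) (h : PRIORITY_INDEX.get? g = some j) :
    (g = "Lawn" ∧ j = 0) ∨ (g = "Pasture" ∧ j = 1) ∨ (g = "Wildflower" ∧ j = 2) ∨
    (g = "Clover" ∧ j = 3) ∨ (g = "Cover Crop" ∧ j = 4) ∨ (g = "Food Plot" ∧ j = 5) ∨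
    (g = "Specialty" ∧ j = 6) := by
  simp only [PRIORITY_INDEX, PySem.Dict.get?_mk_cons, beq_iff_eq] at h
  split_ifs at h <;> simp_all [PySem.Dict.get?]

lemma foldl_bStep_none (groups : List String) (best : Option Int)
    (h : ∀ g ∈ groups, PRIORITY_INDEX.get? g = none) :
    groups.foldl bStep best = best := by
  induction groups generalizing best with
  | nil => rfl
  | cons g gs ih =>
    have hg := h g (List.mem_cons_self ..)
    simp only [List.foldl_cons, bStep, hg]
    exact ih _ (fun x hx => h x (List.mem_cons_of_mem _ hx))

lemma foldl_bStep_keep (groups : List String) (k : Int)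
    (hmin : ∀ g ∈ groups, ∀ j, PRIORITY_INDEX.get? g = some j → k ≤ j) :
    groups.foldl bStep (some k) = some k := by
  induction groups with
  | nil => rfl
  | cons g gs ih =>
    simp only [List.foldl_cons, bStep]
    have step : bStep (some k) g = some k := by
      simp only [bStep]
      cases hidx : PRIORITY_INDEX.get? g with
      | none => rfl
      | some j =>
        have := hmin g (List.mem_cons_self ..) j hidx
        simp [show ¬ (j < k) by omega]
    cases hidx : PRIORITY_INDEX.get? g with
    | none => exact ih (fun x hx => hmin x (List.mem_cons_of_mem _ hx))
    | some j =>
      have := hmin g (List.mem_cons_self ..) j hidx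
      simp only [show ¬ (j < k) by omega, if_false]
      exact ih (fun x hx => hmin x (List.mem_cons_of_mem _ hx))

lemma foldl_bStep_min' (groups : List String) (k b : Int) (hb : k ≤ b)
    (hmin : ∀ g ∈ groups, ∀ j, PRIORITY_INDEX.get? g = some j → k ≤ j)
    (hw : ∃ g ∈ groups, PRIORITY_INDEX.get? g = some k) :
    groups.foldl bStep (some b) = some k := by
  induction groups generalizing b with
  | nil => exact absurd hw (by simp)
  | cons g gs ih =>
    have hmin' : ∀ x ∈ gs, ∀ j, PRIORITY_INDEX.get? x = some j → k ≤ j :=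
      fun x hx => hmin x (List.mem_cons_of_mem _ hx)
    simp only [List.foldl_cons, bStep]
    cases hidx : PRIORITY_INDEX.get? g with
    | none =>
      rcases hw with ⟨w, hw1, hw2⟩
      rcases List.mem_cons.mp hw1 with rfl | hw1
      · simp [hidx] at hw2
      · exact ih _ hb hmin' ⟨w, hw1, hw2⟩
    | some j =>
      have hkj := hmin g (List.mem_cons_self ..) j hidx
      rcases hw with ⟨w, hw1, hw2⟩
      rcases List.mem_cons.mp hw1 with rfl | hw1
      · rw [hidx] at hw2; injection hw2 with hjk; subst hjk
        by_cases hjb : j < b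
        · simp only [hjb, if_true]; exact foldl_bStep_keep gs j hmin'
        · simp only [hjb, if_false]
          have : b = j := by omega
          subst this; exact foldl_bStep_keep gs b hmin'
      · by_cases hjb : j < b
        · simp only [hjb, if_true]; exact ih _ hkj hmin' ⟨w, hw1, hw2⟩
        · simp only [hjb, if_false]; exact ih _ hb hmin' ⟨w, hw1, hw2⟩

lemma foldl_bStep_min (groups : List String) (k : Int)
    (hmin : ∀ g ∈ groups, ∀ j, PRIORITY_INDEX.get? g = some j → k ≤ j)
    (hw : ∃ g ∈ groups, PRIORITY_INDEX.get? g = some k) :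
    groups.foldl bStep none = some k := by
  induction groups with
  | nil => exact absurd hw (by simp)
  | cons g gs ih =>
    have hmin' : ∀ x ∈ gs, ∀ j, PRIORITY_INDEX.get? x = some j → k ≤ j :=
      fun x hx => hmin x (List.mem_cons_of_mem _ hx)
    simp only [List.foldl_cons, bStep]
    cases hidx : PRIORITY_INDEX.get? g with
    | none =>
      rcases hw with ⟨w, hw1, hw2⟩
      rcases List.mem_cons.mp hw1 with rfl | hw1
      · simp [hidx] at hw2
      · exact ih hmin' ⟨w, hw1, hw2⟩
    | some j =>
      rcases hw with ⟨w, hw1, hw2⟩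
      rcases List.mem_cons.mp hw1 with rfl | hw1
      · rw [hidx] at hw2; injection hw2 with hjk; subst hjk
        exact foldl_bStep_keep gs j hmin'
      · have hkj := hmin g (List.mem_cons_self ..) j hidx
        exact foldl_bStep_min' gs k j hkj hmin' ⟨w, hw1, hw2⟩

-- the tails of the two ports agree for every groups list
lemma tails_eq (groups : List String) :
    (match apcLoop groups CATEGORY_PRIORITY with
     | some p => p
     | none => match groups with
               | [] => "Unknown"
               | g :: _ => g) =
    (match groups.foldl bStep none with
     | some i => (PySem.List.pyGet? CATEGORY_PRIORITY i).getD "Unknown"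
     | none => match groups with
               | [] => "Unknown"
               | g :: _ => g) := by
  by_cases h0 : "Lawn" ∈ groups
  · rw [foldl_bStep_min groups 0
      (fun g hg j hj => by rcases idx_eq g j hj with ⟨_,rfl⟩|⟨_,rfl⟩|⟨_,rfl⟩|⟨_,rfl⟩|⟨_,rfl⟩|⟨_,rfl⟩|⟨_,rfl⟩ <;> omega)
      ⟨"Lawn", h0, rfl⟩]
    simp [apcLoop, CATEGORY_PRIORITY, h0, PySem.List.pyGet?, PySem.List.pyIdx?]
  by_cases h1 : "Pasture" ∈ groups
  · rw [foldl_bStep_min groups 1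
      (fun g hg j hj => by rcases idx_eq g j hj with ⟨rfl,rfl⟩|⟨_,rfl⟩|⟨_,rfl⟩|⟨_,rfl⟩|⟨_,rfl⟩|⟨_,rfl⟩|⟨_,rfl⟩ <;> first | exact absurd hg h0 | omega)
      ⟨"Pasture", h1, rfl⟩]
    simp [apcLoop, CATEGORY_PRIORITY, h0, h1, PySem.List.pyGet?, PySem.List.pyIdx?]
  by_cases h2 : "Wildflower" ∈ groups
  · rw [foldl_bStep_min groups 2
      (fun g hg j hj => by rcases idx_eq g j hj with ⟨rfl,rfl⟩|⟨rfl,rfl⟩|⟨_,rfl⟩|⟨_,rfl⟩|⟨_,rfl⟩|⟨_,rfl⟩|⟨_,rfl⟩ <;> first | exact absurd hg h0 | exact absurd hg h1 | omega)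
      ⟨"Wildflower", h2, rfl⟩]
    simp [apcLoop, CATEGORY_PRIORITY, h0, h1, h2, PySem.List.pyGet?, PySem.List.pyIdx?]
  by_cases h3 : "Clover" ∈ groups
  · rw [foldl_bStep_min groups 3
      (fun g hg j hj => by rcases idx_eq g j hj with ⟨rfl,rfl⟩|⟨rfl,rfl⟩|⟨rfl,rfl⟩|⟨_,rfl⟩|⟨_,rfl⟩|⟨_,rfl⟩|⟨_,rfl⟩ <;> first | exact absurd hg h0 | exact absurd hg h1 | exact absurd hg h2 | omega)
      ⟨"Clover", h3, rfl⟩]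
    simp [apcLoop, CATEGORY_PRIORITY, h0, h1, h2, h3, PySem.List.pyGet?, PySem.List.pyIdx?]
  by_cases h4 : "Cover Crop" ∈ groups
  · rw [foldl_bStep_min groups 4
      (fun g hg j hj => by rcases idx_eq g j hj with ⟨rfl,rfl⟩|⟨rfl,rfl⟩|⟨rfl,rfl⟩|⟨rfl,rfl⟩|⟨_,rfl⟩|⟨_,rfl⟩|⟨_,rfl⟩ <;> first | exact absurd hg h0 | exact absurd hg h1 | exact absurd hg h2 | exact absurd hg h3 | omega)
      ⟨"Cover Crop", h4, rfl⟩]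
    simp [apcLoop, CATEGORY_PRIORITY, h0, h1, h2, h3, h4, PySem.List.pyGet?, PySem.List.pyIdx?]
  by_cases h5 : "Food Plot" ∈ groups
  · rw [foldl_bStep_min groups 5
      (fun g hg j hj => by rcases idx_eq g j hj with ⟨rfl,rfl⟩|⟨rfl,rfl⟩|⟨rfl,rfl⟩|⟨rfl,rfl⟩|⟨rfl,rfl⟩|⟨_,rfl⟩|⟨_,rfl⟩ <;> first | exact absurd hg h0 | exact absurd hg h1 | exact absurd hg h2 | exact absurd hg h3 | exact absurd hg h4 | omega)
      ⟨"Food Plot", h5, rfl⟩]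
    simp [apcLoop, CATEGORY_PRIORITY, h0, h1, h2, h3, h4, h5, PySem.List.pyGet?, PySem.List.pyIdx?]
  by_cases h6 : "Specialty" ∈ groups
  · rw [foldl_bStep_min groups 6
      (fun g hg j hj => by rcases idx_eq g j hj with ⟨rfl,rfl⟩|⟨rfl,rfl⟩|⟨rfl,rfl⟩|⟨rfl,rfl⟩|⟨rfl,rfl⟩|⟨rfl,rfl⟩|⟨_,rfl⟩ <;> first | exact absurd hg h0 | exact absurd hg h1 | exact absurd hg h2 | exact absurd hg h3 | exact absurd hg h4 | exact absurd hg h5 | omega)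
      ⟨"Specialty", h6, rfl⟩]
    simp [apcLoop, CATEGORY_PRIORITY, h0, h1, h2, h3, h4, h5, h6, PySem.List.pyGet?, PySem.List.pyIdx?]
  · rw [foldl_bStep_none groups none
      (fun g hg => by
        cases hj : PRIORITY_INDEX.get? g with
        | none => rfl
        | some j =>
          rcases idx_eq g j hj with ⟨rfl,_⟩|⟨rfl,_⟩|⟨rfl,_⟩|⟨rfl,_⟩|⟨rfl,_⟩|⟨rfl,_⟩|⟨rfl,_⟩ <;>
            first | exact absurd hg h0 | exact absurd hg h1 | exact absurd hg h2 | exact absurd hg h3 | exact absurd hg h4 | exact absurd hg h5 | exact absurd hg h6)]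
    simp [apcLoop, CATEGORY_PRIORITY, h0, h1, h2, h3, h4, h5, h6]

-- ===== VERDICT (by name: the statement is the Claim_ definition above) =====
theorem assign_primary_category_spec : Claim_equal_assign_primary_category := by
  intro email category_map _
  unfold Spec_assign_primary_category assign_primary_category assign_primary_category_alt
  cases hinfo : ((PySem.Dict.mk category_map).get? email).orElse
      (fun _ => (PySem.Dict.mk category_map).get? (PySem.Str.lower email)) with
  | none => rfl
  | some inner =>
    by_cases hin : inner = []
    · simp [hin]
    · simp only [hin, if_false]
      exact tails_eq _
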